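-- pv_equiv track=rewrite | github.com/MichaelGusev1974/PythonSemminars | seminar5/seminar5.3.py | new_list
-- ===== SOURCE A (Python) =====
-- def new_list(array):
--     new_list =[]
--     for i in range(len(array)):
--         some = array[i]
--         arr = [some]
--         for j in range(i + 1, len(array)):
--              if array[j] > some:
--                  arr.append(array[j])
--                  some = array[j]
--         if len(arr) > 2:
--             new_list.append(arr)
--     return new_list
-- ===== SOURCE B (Python) =====
-- def new_list(array):
--     # Right-to-left memoisation: the greedy chain from i is array[i] followed by
--     # the chain from the first later index whose value exceeds array[i].
--     n = len(array)
--     chains = [None] * n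
--     for i in range(n - 1, -1, -1):
--         j = i + 1
--         while j < n and array[j] <= array[i]:
--             j += 1
--         tail = chains[j] if j < n else []
--         chains[i] = [array[i]] + tail
--     return [c for c in chains if len(c) > 2]
-- ===== Notes on version B (the rewrite author's own statement) =====
-- stated objective: alternative
-- what changed: Replaces A's independent greedy rescan from every start index with a right-to-left memoisation: the chain from i is array[i] prepended to the already-computed chain of the first later index holding a larger value, then chains longer than 2 are filtered out.
import Mathlib
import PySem

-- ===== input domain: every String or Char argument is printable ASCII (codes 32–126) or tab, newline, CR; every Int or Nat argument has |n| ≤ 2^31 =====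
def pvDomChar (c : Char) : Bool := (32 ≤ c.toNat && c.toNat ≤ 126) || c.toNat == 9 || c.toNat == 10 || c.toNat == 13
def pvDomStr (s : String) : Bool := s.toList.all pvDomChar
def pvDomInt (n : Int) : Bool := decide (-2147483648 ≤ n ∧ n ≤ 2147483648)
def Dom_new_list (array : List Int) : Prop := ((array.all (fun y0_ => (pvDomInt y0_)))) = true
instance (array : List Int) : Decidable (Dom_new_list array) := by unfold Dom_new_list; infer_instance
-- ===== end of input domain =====

-- B memoises the greedy chains right-to-left (chain from i = array[i] ++ chain from first later index
-- with a larger value), replacing A's per-start greedy rescan; return values proved equal.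

-- ===== PORT A =====
def new_list (array : List Int) : List (List Int) :=
  (PySem.List.pyRange 0 array.length 1).foldl (fun acc i =>
    -- some = array[i]; arr = [some]; inner loop over j in range(i+1, len(array))
    let p := (PySem.List.pyRange (i + 1) array.length 1).foldl
      (fun (st : List Int × Int) j =>
        let aj := PySem.List.pyGetD array j 0
        if aj > st.2 then (st.1 ++ [aj], aj) else st)
      ([PySem.List.pyGetD array i 0], PySem.List.pyGetD array i 0)
    if p.1.length > 2 then acc ++ [p.1] else acc) []

-- ===== PORT B =====
-- the 'while j < n and array[j] <= array[i]: j += 1' loop: how many leading elements are ≤ a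
def bScanLe (a : Int) : List Int → Nat
  | [] => 0
  | x :: xs => if x ≤ a then bScanLe a xs + 1 else 0

-- Source B's backward loop 'for i in range(n-1, -1, -1)': chains of the suffix are built first,
-- then the entry for the current index is prepended ('chains[j] if j < n else []').
def bBuildChains : List Int → List (List Int)
  | [] => []
  | a :: rest =>
    let chains := bBuildChains rest
    (a :: ((chains.drop (bScanLe a rest)).headD [])) :: chains

def new_list_alt (array : List Int) : List (List Int) :=
  (bBuildChains array).filter (fun c => c.length > 2)

-- ===== PRECONDITION & SPEC =====
def Spec_new_list (array : List Int) (out : List (List Int)) : Prop := out = new_list_alt array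
instance (array : List Int) (out : List (List Int)) : Decidable (Spec_new_list array out) := by unfold Spec_new_list; infer_instance

-- ===== CLAIM (what is proved, stated in full; the proofs are below) =====
def Claim_equal_new_list : Prop := ∀ (array : List Int), Dom_new_list array → Spec_new_list array (new_list array)

-- ===== LEMMAS AND PROOFS =====

-- the greedy strictly-increasing chain continuing from current maximum m
def gchain : Int → List Int → List Int
  | _, [] => []
  | m, x :: xs => if x > m then x :: gchain x xs else gchain m xs

-- per-suffix specification list: entry for each start position
def specList : List Int → List (List Int)
  | [] => []
  | a :: rest => (a :: gchain a rest) :: specList rest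

theorem bScanLe_headD (s : List Int) : ∀ a : Int,
    (((bBuildChains s).drop (bScanLe a s)).headD []) = gchain a s := by
  induction s with
  | nil => intro a; rfl
  | cons x xs ih =>
    intro a
    by_cases h : x ≤ a
    · have hng : ¬ x > a := by omega
      simp only [bBuildChains, bScanLe, gchain, if_pos h, if_neg hng, List.drop_succ_cons]
      exact ih a
    · have hg : x > a := by omega
      simp only [bBuildChains, bScanLe, gchain, if_neg h, if_pos hg, List.drop_zero, List.headD_cons]
      exact congrArg _ (ih x)

theorem bBuildChains_eq_specList (s : List Int) : bBuildChains s = specList s := by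
  induction s with
  | nil => rfl
  | cons a rest ih =>
    simp only [bBuildChains, specList]
    rw [bScanLe_headD rest a, ih]

-- A's inner loop, folded over the actual suffix elements, extends arr by the greedy chain
theorem innerA_fold (l : List Int) : ∀ (arr : List Int) (m : Int),
    (l.foldl (fun (st : List Int × Int) aj =>
        if aj > st.2 then (st.1 ++ [aj], aj) else st) (arr, m)).1
      = arr ++ gchain m l := by
  induction l with
  | nil => intro arr m; simp [gchain]
  | cons x xs ih =>
    intro arr m
    by_cases h : x > m
    · simp [List.foldl_cons, h, gchain, ih]
    · simp [List.foldl_cons, h, gchain, ih]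

-- A's per-start value: map over indices equals the per-suffix spec list
theorem mapF_eq_specList (array : List Int) :
    (List.range array.length).map
      (fun k => (array.getD k 0) :: gchain (array.getD k 0) (array.drop (k + 1)))
      = specList array := by
  induction array with
  | nil => rfl
  | cons a rest ih =>
    rw [List.length_cons, List.range_succ_eq_map, List.map_cons, List.map_map]
    simp only [specList]
    refine List.cons_eq_cons.mpr ⟨by simp, ?_⟩
    rw [← ih]
    apply List.map_congr_left
    intro k _
    simp


-- A's per-start computation, abbreviated for the proofs
def aInner (array : List Int) (i : Int) : List Int :=
  ((PySem.List.pyRange (i + 1) array.length 1).foldl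
    (fun (st : List Int × Int) j =>
      let aj := PySem.List.pyGetD array j 0
      if aj > st.2 then (st.1 ++ [aj], aj) else st)
    ([PySem.List.pyGetD array i 0], PySem.List.pyGetD array i 0)).1

theorem aInner_eq (array : List Int) (k : Nat) :
    aInner array (k : Int) = array.getD k 0 :: gchain (array.getD k 0) (array.drop (k + 1)) := by
  unfold aInner
  have h0 : (0:Int) ≤ (k : Int) + 1 := by omega
  rw [show ((k:Int) + 1) = (((k+1 : Nat)) : Int) by push_cast; ring]
  rw [PySem.List.foldl_pyRange_pyGetD' array 0
    (fun (st : List Int × Int) aj => if aj > st.2 then (st.1 ++ [aj], aj) else st)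
    ([PySem.List.pyGetD array (k:Int) 0], PySem.List.pyGetD array (k:Int) 0) (by push_cast; omega)]
  rw [innerA_fold]
  simp

theorem map_filter_len (l : List (List Int)) :
    ∀ acc : List (List Int), acc ++ l.filter (fun c => c.length > 2) =
      l.foldl (fun acc c => if c.length > 2 then acc ++ [c] else acc) acc := by
  induction l with
  | nil => intro acc; simp
  | cons x xs ih =>
    intro acc
    by_cases h : x.length > 2 <;> simp [h, ← ih]

theorem new_list_spec : Claim_equal_new_list := by
  intro array _
  unfold Spec_new_list new_list new_list_alt
  rw [bBuildChains_eq_specList]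
  show (PySem.List.pyRange 0 array.length 1).foldl
      (fun acc i => if (aInner array i).length > 2 then acc ++ [aInner array i] else acc) []
      = (specList array).filter (fun c => c.length > 2)
  have hmap : (PySem.List.pyRange 0 array.length 1).map (aInner array) = specList array := by
    rw [PySem.List.pyRange_one]
    simp only [sub_zero, Int.toNat_natCast, List.map_map]
    rw [← mapF_eq_specList]
    apply List.map_congr_left
    intro k _
    simpa using aInner_eq array k
  refine ((List.foldl_map (f := aInner array)
    (g := fun (acc : List (List Int)) (c : List Int) => if c.length > 2 then acc ++ [c] else acc)
    (l := PySem.List.pyRange 0 (array.length : Int) 1) (init := [])).symm).trans ?_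
  rw [hmap, ← map_filter_len, List.nil_append]
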